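-- pv_equiv track=rewrite | github.com/saezlab/pygreta | src/gretapy/ds/_toy.py | _find_non_overlapping_position
-- ===== SOURCE A (Python) =====
-- def _check_overlap(chrom: str, start: int, end: int, cre_intervals: dict, min_gap: int = 2) -> bool:
--     """Check if a CRE overlaps with any existing CREs on the same chromosome."""
--     if chrom not in cre_intervals:
--         return False
--     for existing_start, existing_end in cre_intervals[chrom]:
--         # Check if intervals overlap or are too close (less than min_gap apart)
--         if not (end + min_gap <= existing_start or start >= existing_end + min_gap):
--             return True
--     return False
--
-- def _find_non_overlapping_position(
--     chrom: str,
--     preferred_start: int,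
--     cre_length: int,
--     cre_intervals: dict,
--     min_gap: int = 2,
--     search_range: int = 10000,
-- ) -> int:
--     """Find a non-overlapping position for a CRE, searching near the preferred position."""
--     # Try the preferred position first
--     if not _check_overlap(chrom, preferred_start, preferred_start + cre_length, cre_intervals, min_gap):
--         return preferred_start
--
--     # Search alternating upstream and downstream
--     for offset in range(1, search_range):
--         # Try downstream
--         candidate = preferred_start + offset
--         if candidate > 0 and not _check_overlap(chrom, candidate, candidate + cre_length, cre_intervals, min_gap):
--             return candidate
--         # Try upstream
--         candidate = preferred_start - offset
--         if candidate > 0 and not _check_overlap(chrom, candidate, candidate + cre_length, cre_intervals, min_gap):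
--             return candidate
--
--     # Fallback: return a position far from existing CREs
--     return preferred_start + search_range
-- ===== SOURCE B (Python) =====
-- def _find_non_overlapping_position(
--     chrom: str,
--     preferred_start: int,
--     cre_length: int,
--     cre_intervals: dict,
--     min_gap: int = 2,
--     search_range: int = 10000,
-- ) -> int:
--     """Interval-arithmetic version: a candidate start p collides with an existing
--     CRE [es, ee) exactly when es - cre_length - min_gap < p < ee + min_gap, so the
--     nearest free start on each side is an edge of some forbidden interval (or 1).
--     No scanning of offsets is needed."""
--     ivs = cre_intervals.get(chrom, [])
--     lo = [es - cre_length - min_gap for es, ee in ivs]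
--     hi = [ee + min_gap for es, ee in ivs]
--
--     def blocked(p):
--         return any(l < p < h for l, h in zip(lo, hi))
--
--     q = preferred_start
--     if not blocked(q):
--         return q
--     # nearest free position >= q (and > 0): the least admissible candidate edge
--     downs = [p for p in [1] + hi if q <= p and 1 <= p and not blocked(p)]
--     down = min(downs)  # never empty: max(1, max(hi)) is free, >= 1 and > q
--     # nearest free position <= q (and > 0), if any: the greatest admissible edge
--     ups = [p for p in lo if p <= q and 1 <= p and not blocked(p)]
--     doff = down - q
--     if not ups:
--         return down if doff < search_range else q + search_range
--     up = max(ups)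
--     if doff <= q - up:  # A tries downstream first: ties go downstream
--         return down if doff < search_range else q + search_range
--     return up if q - up < search_range else q + search_range
-- ===== Notes on version B (the rewrite author's own statement) =====
-- stated objective: alternative
-- what changed: Replaces the alternating offset-by-offset scan (re-checking every existing CRE at each of up to search_range-1 offsets) with interval arithmetic: each existing CRE forbids an open interval of starts, so the nearest free start on each side is an edge of a forbidden interval (or 1); B collects these candidate edges, filters the admissible ones, takes their min/max, and compares the two offsets with ties going downstream.
import Mathlib
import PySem

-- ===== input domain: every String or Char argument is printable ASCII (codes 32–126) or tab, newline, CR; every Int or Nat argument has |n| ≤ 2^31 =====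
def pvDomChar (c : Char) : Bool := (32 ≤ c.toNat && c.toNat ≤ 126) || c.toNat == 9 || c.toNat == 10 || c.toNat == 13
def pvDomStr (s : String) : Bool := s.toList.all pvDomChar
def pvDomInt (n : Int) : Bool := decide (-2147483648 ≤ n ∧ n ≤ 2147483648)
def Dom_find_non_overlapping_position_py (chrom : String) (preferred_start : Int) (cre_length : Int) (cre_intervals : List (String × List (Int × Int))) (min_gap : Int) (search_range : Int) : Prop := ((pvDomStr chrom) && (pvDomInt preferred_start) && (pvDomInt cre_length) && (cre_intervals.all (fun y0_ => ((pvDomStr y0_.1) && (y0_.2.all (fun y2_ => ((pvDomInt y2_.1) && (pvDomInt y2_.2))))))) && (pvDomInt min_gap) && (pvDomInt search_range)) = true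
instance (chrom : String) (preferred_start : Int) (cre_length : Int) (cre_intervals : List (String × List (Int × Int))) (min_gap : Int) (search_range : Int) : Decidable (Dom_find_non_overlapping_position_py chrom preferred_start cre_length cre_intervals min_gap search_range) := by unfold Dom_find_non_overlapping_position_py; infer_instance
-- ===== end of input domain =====

-- B replaces A's alternating offset-by-offset scan by interval arithmetic over the
-- forbidden-interval edges (objective: alternative algorithm, same return value).

-- ===== PORT A =====
-- _check_overlap: early-return-true loop over the chromosome's intervals = List.any
def check_overlap_py (chrom : String) (start : Int) (end_ : Int) (cre_intervals : List (String × List (Int × Int))) (min_gap : Int) : Bool :=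
  match cre_intervals.lookup chrom with
  | none => false
  | some l => l.any (fun e => !(decide (end_ + min_gap ≤ e.1) || decide (start ≥ e.2 + min_gap)))

-- the 'for offset in range(1, search_range)' loop with its two early returns
def aSearch (chrom : String) (q : Int) (len : Int) (ivs : List (String × List (Int × Int))) (gap : Int) : List Int → Option Int
  | [] => none
  | off :: rest =>
    if 0 < q + off ∧ check_overlap_py chrom (q + off) (q + off + len) ivs gap = false then some (q + off)
    else if 0 < q - off ∧ check_overlap_py chrom (q - off) (q - off + len) ivs gap = false then some (q - off)
    else aSearch chrom q len ivs gap rest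

def find_non_overlapping_position_py (chrom : String) (preferred_start : Int) (cre_length : Int) (cre_intervals : List (String × List (Int × Int))) (min_gap : Int) (search_range : Int) : Int :=
  if !check_overlap_py chrom preferred_start (preferred_start + cre_length) cre_intervals min_gap then preferred_start
  else
    match aSearch chrom preferred_start cre_length cre_intervals min_gap (PySem.List.pyRange 1 search_range 1) with
    | some c => c
    | none => preferred_start + search_range

-- ===== PORT B =====
-- Source B's local lists / closure / blocked-case body as parametrised helpers
def bLo (len gap : Int) (l : List (Int × Int)) : List Int := l.map (fun e => e.1 - len - gap)
def bHi (gap : Int) (l : List (Int × Int)) : List Int := l.map (fun e => e.2 + gap)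
def bBlocked (lo hi : List Int) (p : Int) : Bool := (lo.zip hi).any (fun e => decide (e.1 < p) && decide (p < e.2))
def bDowns (lo hi : List Int) (q : Int) : List Int := (1 :: hi).filter (fun p => decide (q ≤ p) && decide (1 ≤ p) && !bBlocked lo hi p)
def bUps (lo hi : List Int) (q : Int) : List Int := lo.filter (fun p => decide (p ≤ q) && decide (1 ≤ p) && !bBlocked lo hi p)

-- the body of Source B after 'if not blocked(q)' failed: edge candidates, min/max, offset comparison
def bSearch (lo hi : List Int) (q sr : Int) : Int :=
  match PySem.List.min? (bDowns lo hi q) (fun x => x) with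
  | none => q + sr   -- unreachable (bDowns is nonempty when q is blocked): totalisation of Python's min
  | some down =>
    match PySem.List.max? (bUps lo hi q) (fun x => x) with
    | none => if down - q < sr then down else q + sr
    | some up =>
      if down - q ≤ q - up then (if down - q < sr then down else q + sr)
      else (if q - up < sr then up else q + sr)

def find_non_overlapping_position_py_alt (chrom : String) (preferred_start : Int) (cre_length : Int) (cre_intervals : List (String × List (Int × Int))) (min_gap : Int) (search_range : Int) : Int :=
  if !bBlocked (bLo cre_length min_gap ((cre_intervals.lookup chrom).getD []))
               (bHi min_gap ((cre_intervals.lookup chrom).getD [])) preferred_start then preferred_start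
  else bSearch (bLo cre_length min_gap ((cre_intervals.lookup chrom).getD []))
               (bHi min_gap ((cre_intervals.lookup chrom).getD [])) preferred_start search_range

-- ===== PRECONDITION & SPEC =====
def Spec_find_non_overlapping_position_py (chrom : String) (preferred_start : Int) (cre_length : Int) (cre_intervals : List (String × List (Int × Int))) (min_gap : Int) (search_range : Int) (out : Int) : Prop := out = find_non_overlapping_position_py_alt chrom preferred_start cre_length cre_intervals min_gap search_range
instance (chrom : String) (preferred_start : Int) (cre_length : Int) (cre_intervals : List (String × List (Int × Int))) (min_gap : Int) (search_range : Int) (out : Int) : Decidable (Spec_find_non_overlapping_position_py chrom preferred_start cre_length cre_intervals min_gap search_range out) := by unfold Spec_find_non_overlapping_position_py; infer_instance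

-- ===== CLAIM (what is proved, stated in full; the proofs are below) =====
def Claim_equal_find_non_overlapping_position_py : Prop := ∀ (chrom : String) (preferred_start : Int) (cre_length : Int) (cre_intervals : List (String × List (Int × Int))) (min_gap : Int) (search_range : Int), Dom_find_non_overlapping_position_py chrom preferred_start cre_length cre_intervals min_gap search_range → Spec_find_non_overlapping_position_py chrom preferred_start cre_length cre_intervals min_gap search_range (find_non_overlapping_position_py chrom preferred_start cre_length cre_intervals min_gap search_range)

-- ===== LEMMAS AND PROOFS =====

-- A's overlap test at start p equals B's blocked test at p
theorem check_eq_blocked (chrom : String) (len : Int) (ivs : List (String × List (Int × Int))) (gap p : Int) :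
    check_overlap_py chrom p (p + len) ivs gap
      = bBlocked (bLo len gap ((ivs.lookup chrom).getD [])) (bHi gap ((ivs.lookup chrom).getD [])) p := by
  unfold check_overlap_py bBlocked bLo bHi
  cases h : ivs.lookup chrom with
  | none => simp
  | some l =>
    simp only [Option.getD_some, List.zip_map']
    rw [List.any_map, Bool.eq_iff_iff]
    simp only [List.any_eq_true]
    constructor
    · rintro ⟨e, he, hc⟩
      refine ⟨e, he, ?_⟩
      simp only [Bool.not_eq_eq_eq_not, Bool.not_true, Bool.or_eq_false_iff,
        decide_eq_false_iff_not, not_le] at hc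
      simp only [Function.comp_apply, Bool.and_eq_true, decide_eq_true_eq]
      omega
    · rintro ⟨e, he, hc⟩
      refine ⟨e, he, ?_⟩
      simp only [Function.comp_apply, Bool.and_eq_true, decide_eq_true_eq] at hc
      simp only [Bool.not_eq_eq_eq_not, Bool.not_true, Bool.or_eq_false_iff,
        decide_eq_false_iff_not, not_le]
      omega

-- an element of 1 :: hi bounding hi from above
theorem exists_top (hi : List Int) : ∃ m ∈ (1 :: hi : List Int), 1 ≤ m ∧ ∀ x ∈ hi, x ≤ m := by
  induction hi with
  | nil => exact ⟨1, by simp⟩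
  | cons h t ih =>
    obtain ⟨m, hm, h1, hb⟩ := ih
    rcases le_total h m with hc | hc
    · refine ⟨m, ?_, h1, ?_⟩
      · simp only [List.mem_cons] at hm ⊢; tauto
      · intro x hx
        rcases List.mem_cons.1 hx with rfl | hx'
        · exact hc
        · exact hb x hx'
    · refine ⟨h, by simp, le_trans h1 hc, ?_⟩
      intro x hx
      rcases List.mem_cons.1 hx with rfl | hx'
      · exact le_refl x
      · exact le_trans (hb x hx') hc

theorem mem_bDowns (lo hi : List Int) (q p : Int) :
    p ∈ bDowns lo hi q ↔ p ∈ (1 :: hi : List Int) ∧ q ≤ p ∧ 1 ≤ p ∧ bBlocked lo hi p = false := by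
  unfold bDowns
  simp [List.mem_filter, and_assoc]

theorem mem_bUps (lo hi : List Int) (q p : Int) :
    p ∈ bUps lo hi q ↔ p ∈ lo ∧ p ≤ q ∧ 1 ≤ p ∧ bBlocked lo hi p = false := by
  unfold bUps
  simp [List.mem_filter, and_assoc]

theorem blocked_iff (lo hi : List Int) (p : Int) :
    bBlocked lo hi p = true ↔ ∃ e ∈ lo.zip hi, e.1 < p ∧ p < e.2 := by
  unfold bBlocked; simp

theorem bDowns_nonempty (lo hi : List Int) (q : Int) (hq : bBlocked lo hi q = true) :
    bDowns lo hi q ≠ [] := by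
  obtain ⟨m, hm, h1, hb⟩ := exists_top hi
  obtain ⟨e, he, _, hq2⟩ := (blocked_iff lo hi q).1 hq
  obtain ⟨e1, e2⟩ := e
  have he2 : e2 ∈ hi := (List.of_mem_zip he).2
  have hqm : q ≤ m := le_trans (le_of_lt hq2) (hb _ he2)
  have hmb : bBlocked lo hi m = false := by
    rw [← Bool.not_eq_true, blocked_iff]
    rintro ⟨⟨f1, f2⟩, hf, _, h2⟩
    exact absurd (hb _ ((List.of_mem_zip hf).2)) (not_le.2 h2)
  have hmem : m ∈ bDowns lo hi q := (mem_bDowns lo hi q m).2 ⟨hm, hqm, h1, hmb⟩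
  intro hnil
  rw [hnil] at hmem
  exact List.not_mem_nil hmem

-- every free position ≥ q is bounded below by a member of bDowns
theorem down_bound (lo hi : List Int) (q : Int) (hq : bBlocked lo hi q = true) :
    ∀ (n : Nat) (p : Int), (p - q).toNat ≤ n → q ≤ p → 1 ≤ p → bBlocked lo hi p = false →
      ∃ d ∈ bDowns lo hi q, d ≤ p := by
  intro n
  induction n with
  | zero =>
    intro p hn hqp _ hfree
    have : p = q := by omega
    rw [this] at hfree
    rw [hfree] at hq
    exact absurd hq (by simp)
  | succ n ih =>
    intro p hn hqp h1 hfree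
    by_cases hmem : p ∈ (1 :: hi : List Int)
    · exact ⟨p, (mem_bDowns lo hi q p).2 ⟨hmem, hqp, h1, hfree⟩, le_refl p⟩
    · have hpq : q < p := by
        rcases lt_or_eq_of_le hqp with h | h
        · exact h
        · rw [← h] at hfree; rw [hfree] at hq; exact absurd hq (by simp)
      have hp1 : p ≠ 1 := fun h => hmem (by rw [h]; simp)
      have hfree' : bBlocked lo hi (p - 1) = false := by
        rw [← Bool.not_eq_true, blocked_iff]
        rintro ⟨⟨f1, f2⟩, hf, hl, hr⟩
        have hnb : ¬ ∃ e ∈ lo.zip hi, e.1 < p ∧ p < e.2 :=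
          (blocked_iff lo hi p).not.1 (by simp [hfree])
        have hno : ¬ (f1 < p ∧ p < f2) := fun h => hnb ⟨(f1, f2), hf, h⟩
        have hpe : p = f2 := by simp at hl hr ⊢; omega
        exact hmem (List.mem_cons.2 (Or.inr (hpe ▸ (List.of_mem_zip hf).2)))
      obtain ⟨d, hd, hdp⟩ := ih (p - 1) (by omega) (by omega) (by omega) hfree'
      exact ⟨d, hd, by omega⟩

-- every free position ≤ q is bounded above by a member of bUps
theorem up_bound (lo hi : List Int) (q : Int) (hq : bBlocked lo hi q = true) :
    ∀ (n : Nat) (p : Int), (q - p).toNat ≤ n → p ≤ q → 1 ≤ p → bBlocked lo hi p = false →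
      ∃ u ∈ bUps lo hi q, p ≤ u := by
  intro n
  induction n with
  | zero =>
    intro p hn hpq _ hfree
    have : p = q := by omega
    rw [this] at hfree
    rw [hfree] at hq
    exact absurd hq (by simp)
  | succ n ih =>
    intro p hn hpq h1 hfree
    by_cases hmem : p ∈ lo
    · exact ⟨p, (mem_bUps lo hi q p).2 ⟨hmem, hpq, h1, hfree⟩, le_refl p⟩
    · have hpq' : p < q := by
        rcases lt_or_eq_of_le hpq with h | h
        · exact h
        · rw [h] at hfree; rw [hfree] at hq; exact absurd hq (by simp)
      have hfree' : bBlocked lo hi (p + 1) = false := by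
        rw [← Bool.not_eq_true, blocked_iff]
        rintro ⟨⟨f1, f2⟩, hf, hl, hr⟩
        have hnb : ¬ ∃ e ∈ lo.zip hi, e.1 < p ∧ p < e.2 :=
          (blocked_iff lo hi p).not.1 (by simp [hfree])
        have hno : ¬ (f1 < p ∧ p < f2) := fun h => hnb ⟨(f1, f2), hf, h⟩
        have hpe : p = f1 := by simp at hl hr ⊢; omega
        exact hmem (hpe ▸ (List.of_mem_zip hf).1)
      obtain ⟨u, hu, hup⟩ := ih (p + 1) (by omega) (by omega) (by omega) hfree'
      exact ⟨u, hu, by omega⟩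

-- A's loop returns none when no offset in the list yields a free candidate
theorem aSearch_none (chrom : String) (q len : Int) (ivs : List (String × List (Int × Int))) (gap : Int) :
    ∀ offs : List Int,
      (∀ off ∈ offs, ¬(0 < q + off ∧ check_overlap_py chrom (q + off) (q + off + len) ivs gap = false)
        ∧ ¬(0 < q - off ∧ check_overlap_py chrom (q - off) (q - off + len) ivs gap = false)) →
      aSearch chrom q len ivs gap offs = none := by
  intro offs
  induction offs with
  | nil => intro _; rfl
  | cons o t ih =>
    intro h
    have ho := h o List.mem_cons_self
    simp only [aSearch, if_neg ho.1, if_neg ho.2]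
    exact ih (fun off hoff => h off (List.mem_cons_of_mem o hoff))

-- A's loop returns the downstream candidate of the first hitting offset
theorem aSearch_hit_down (chrom : String) (q len : Int) (ivs : List (String × List (Int × Int))) (gap k : Int) :
    ∀ offs : List Int, offs.Pairwise (· < ·) → k ∈ offs →
      (0 < q + k ∧ check_overlap_py chrom (q + k) (q + k + len) ivs gap = false) →
      (∀ off ∈ offs, off < k →
        ¬(0 < q + off ∧ check_overlap_py chrom (q + off) (q + off + len) ivs gap = false)
          ∧ ¬(0 < q - off ∧ check_overlap_py chrom (q - off) (q - off + len) ivs gap = false)) →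
      aSearch chrom q len ivs gap offs = some (q + k) := by
  intro offs
  induction offs with
  | nil => intro _ hk; exact absurd hk List.not_mem_nil
  | cons o t ih =>
    intro hpw hk hhit hmin
    rcases List.mem_cons.1 hk with rfl | hkt
    · simp only [aSearch, if_pos hhit]
    · have hok : o < k := (List.pairwise_cons.1 hpw).1 k hkt
      have ho := hmin o List.mem_cons_self hok
      simp only [aSearch, if_neg ho.1, if_neg ho.2]
      exact ih (List.pairwise_cons.1 hpw).2 hkt hhit
        (fun off hoff h => hmin off (List.mem_cons_of_mem o hoff) h)

-- A's loop returns the upstream candidate of the first hitting offset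
theorem aSearch_hit_up (chrom : String) (q len : Int) (ivs : List (String × List (Int × Int))) (gap k : Int) :
    ∀ offs : List Int, offs.Pairwise (· < ·) → k ∈ offs →
      ¬(0 < q + k ∧ check_overlap_py chrom (q + k) (q + k + len) ivs gap = false) →
      (0 < q - k ∧ check_overlap_py chrom (q - k) (q - k + len) ivs gap = false) →
      (∀ off ∈ offs, off < k →
        ¬(0 < q + off ∧ check_overlap_py chrom (q + off) (q + off + len) ivs gap = false)
          ∧ ¬(0 < q - off ∧ check_overlap_py chrom (q - off) (q - off + len) ivs gap = false)) →
      aSearch chrom q len ivs gap offs = some (q - k) := by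
  intro offs
  induction offs with
  | nil => intro _ hk; exact absurd hk List.not_mem_nil
  | cons o t ih =>
    intro hpw hk hnd hhit hmin
    rcases List.mem_cons.1 hk with rfl | hkt
    · simp only [aSearch, if_neg hnd, if_pos hhit]
    · have hok : o < k := (List.pairwise_cons.1 hpw).1 k hkt
      have ho := hmin o List.mem_cons_self hok
      simp only [aSearch, if_neg ho.1, if_neg ho.2]
      exact ih (List.pairwise_cons.1 hpw).2 hkt hnd hhit
        (fun off hoff h => hmin off (List.mem_cons_of_mem o hoff) h)

-- the main equivalence
theorem main_eq (chrom : String) (q len : Int) (ivs : List (String × List (Int × Int))) (gap sr : Int) :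
    find_non_overlapping_position_py chrom q len ivs gap sr
      = find_non_overlapping_position_py_alt chrom q len ivs gap sr := by
  have hce : ∀ p, check_overlap_py chrom p (p + len) ivs gap
      = bBlocked (bLo len gap ((ivs.lookup chrom).getD [])) (bHi gap ((ivs.lookup chrom).getD [])) p :=
    fun p => check_eq_blocked chrom len ivs gap p
  unfold find_non_overlapping_position_py find_non_overlapping_position_py_alt
  rw [hce q]
  set lo := bLo len gap ((ivs.lookup chrom).getD []) with hlo
  set hi := bHi gap ((ivs.lookup chrom).getD []) with hhi
  by_cases hb : bBlocked lo hi q = true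
  · rw [hb]
    simp only [Bool.not_true, Bool.false_eq_true, if_false]
    -- bDowns is nonempty, so min? is some down; down is the least free position ≥ q
    rcases hdownE : PySem.List.min? (bDowns lo hi q) (fun x => x) with _ | down
    · exact absurd ((PySem.List.min?_eq_none_iff _ _).1 hdownE) (bDowns_nonempty lo hi q hb)
    obtain ⟨hdm, hdq, hd1, hdfree⟩ := (mem_bDowns lo hi q down).1 (PySem.List.min?_mem hdownE)
    have hdmin : ∀ p, q ≤ p → 1 ≤ p → bBlocked lo hi p = false → down ≤ p := by
      intro p hqp h1 hfree
      obtain ⟨d, hd, hdp⟩ := down_bound lo hi q hb (p - q).toNat p le_rfl hqp h1 hfree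
      exact le_trans (PySem.List.min?_isMin hdownE d hd) hdp
    have hdq' : q < down := by
      rcases lt_or_eq_of_le hdq with h | h
      · exact h
      · rw [← h] at hdfree; rw [hdfree] at hb; exact absurd hb (by simp)
    unfold bSearch
    rcases hupE : PySem.List.max? (bUps lo hi q) (fun x => x) with _ | up
    all_goals simp only [hdownE, hupE]
    · -- no free position ≤ q at all
      have hupnone : ∀ p, p ≤ q → 1 ≤ p → bBlocked lo hi p = false → False := by
        intro p hpq h1 hfree
        obtain ⟨u, hu, _⟩ := up_bound lo hi q hb (q - p).toNat p le_rfl hpq h1 hfree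
        rw [(PySem.List.max?_eq_none_iff _ _).1 hupE] at hu
        exact List.not_mem_nil hu
      have hnohit : ∀ off : Int, 1 ≤ off → off < down - q →
          ¬(0 < q + off ∧ check_overlap_py chrom (q + off) (q + off + len) ivs gap = false)
            ∧ ¬(0 < q - off ∧ check_overlap_py chrom (q - off) (q - off + len) ivs gap = false) := by
        intro off h1 hoff
        constructor
        · rintro ⟨hpos, hfree⟩
          rw [hce] at hfree
          have := hdmin (q + off) (by omega) (by omega) hfree
          omega
        · rintro ⟨hpos, hfree⟩
          rw [hce] at hfree
          exact hupnone (q - off) (by omega) (by omega) hfree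
      by_cases hsr : down - q < sr
      · rw [if_pos hsr,
          aSearch_hit_down chrom q len ivs gap (down - q) _
            (PySem.List.pairwise_lt_pyRange_one 1 sr)
            ((PySem.List.mem_pyRange_one).2 ⟨by omega, hsr⟩)
            ⟨by omega, by rw [hce]; have h : q + (down - q) = down := by omega
                          rw [h]; exact hdfree⟩
            (fun off hoff h => hnohit off ((PySem.List.mem_pyRange_one).1 hoff).1 h)]
        simp only []
        omega
      · rw [if_neg hsr,
          aSearch_none chrom q len ivs gap _
            (fun off hoff => hnohit off ((PySem.List.mem_pyRange_one).1 hoff).1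
              (by have := ((PySem.List.mem_pyRange_one).1 hoff).2; omega))]
    · -- up is the greatest free position in [1, q]
      obtain ⟨hum, huq, hu1, hufree⟩ := (mem_bUps lo hi q up).1 (PySem.List.max?_mem hupE)
      have humax : ∀ p, p ≤ q → 1 ≤ p → bBlocked lo hi p = false → p ≤ up := by
        intro p hpq h1 hfree
        obtain ⟨u, hu, hpu⟩ := up_bound lo hi q hb (q - p).toNat p le_rfl hpq h1 hfree
        exact le_trans hpu (PySem.List.max?_isMax hupE u hu)
      have huq' : up < q := by
        rcases lt_or_eq_of_le huq with h | h
        · exact h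
        · rw [h] at hufree; rw [hufree] at hb; exact absurd hb (by simp)
      by_cases hcase : down - q ≤ q - up
      · -- downstream wins (ties included)
        rw [if_pos hcase]
        have hnohit : ∀ off : Int, 1 ≤ off → off < down - q →
            ¬(0 < q + off ∧ check_overlap_py chrom (q + off) (q + off + len) ivs gap = false)
              ∧ ¬(0 < q - off ∧ check_overlap_py chrom (q - off) (q - off + len) ivs gap = false) := by
          intro off h1 hoff
          constructor
          · rintro ⟨hpos, hfree⟩
            rw [hce] at hfree
            have := hdmin (q + off) (by omega) (by omega) hfree
            omega
          · rintro ⟨hpos, hfree⟩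
            rw [hce] at hfree
            have := humax (q - off) (by omega) (by omega) hfree
            omega
        by_cases hsr : down - q < sr
        · rw [if_pos hsr,
            aSearch_hit_down chrom q len ivs gap (down - q) _
              (PySem.List.pairwise_lt_pyRange_one 1 sr)
              ((PySem.List.mem_pyRange_one).2 ⟨by omega, hsr⟩)
              ⟨by omega, by rw [hce]; have h : q + (down - q) = down := by omega
                            rw [h]; exact hdfree⟩
              (fun off hoff h => hnohit off ((PySem.List.mem_pyRange_one).1 hoff).1 h)]
          simp only []
          omega
        · rw [if_neg hsr,
            aSearch_none chrom q len ivs gap _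
              (fun off hoff => hnohit off ((PySem.List.mem_pyRange_one).1 hoff).1
                (by have := ((PySem.List.mem_pyRange_one).1 hoff).2; omega))]
      · -- upstream wins strictly
        rw [if_neg hcase]
        have hnohit : ∀ off : Int, 1 ≤ off → off < q - up →
            ¬(0 < q + off ∧ check_overlap_py chrom (q + off) (q + off + len) ivs gap = false)
              ∧ ¬(0 < q - off ∧ check_overlap_py chrom (q - off) (q - off + len) ivs gap = false) := by
          intro off h1 hoff
          constructor
          · rintro ⟨hpos, hfree⟩
            rw [hce] at hfree
            have := hdmin (q + off) (by omega) (by omega) hfree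
            omega
          · rintro ⟨hpos, hfree⟩
            rw [hce] at hfree
            have := humax (q - off) (by omega) (by omega) hfree
            omega
        by_cases hsr : q - up < sr
        · rw [if_pos hsr,
            aSearch_hit_up chrom q len ivs gap (q - up) _
              (PySem.List.pairwise_lt_pyRange_one 1 sr)
              ((PySem.List.mem_pyRange_one).2 ⟨by omega, hsr⟩)
              (by rintro ⟨hpos, hfree⟩
                  rw [hce] at hfree
                  have := hdmin (q + (q - up)) (by omega) (by omega) hfree
                  omega)
              ⟨by omega, by rw [hce]; have h : q - (q - up) = up := by omega
                            rw [h]; exact hufree⟩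
              (fun off hoff h => hnohit off ((PySem.List.mem_pyRange_one).1 hoff).1 h)]
          simp only []
          omega
        · rw [if_neg hsr,
            aSearch_none chrom q len ivs gap _
              (fun off hoff => hnohit off ((PySem.List.mem_pyRange_one).1 hoff).1
                (by have := ((PySem.List.mem_pyRange_one).1 hoff).2; omega))]
  · rw [Bool.not_eq_true] at hb
    rw [hb]
    simp

-- ===== VERDICT (by name: the statement is the Claim_ definition above) =====
theorem find_non_overlapping_position_py_spec : Claim_equal_find_non_overlapping_position_py := by
  intro chrom q len ivs gap sr _
  unfold Spec_find_non_overlapping_position_py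
  exact main_eq chrom q len ivs gap sr
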